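-- pv_equiv track=rewrite | github.com/Vepnar/Little-projects | Python/Math/stalinsort.py | reverse_stalin_sort
-- ===== SOURCE A (Python) =====
-- def reverse_stalin_sort(array):
--     """The same as stalin sort but reversed"""
--     array_size = len(array)
--     array = array[:]
--     for _ in range(array_size):
--         i = 0
--         while i < array_size - 1:
--             if array[i] < array[i + 1]:
--                 del array[i + 1]
--                 array_size -= 1
--             i += 1
--     return array
-- ===== SOURCE B (Python) =====
-- def reverse_stalin_sort(array):
--     """The same as stalin sort but reversed"""
--     out = []
--     last = None
--     for x in array:
--         if last is None or x <= last:
--             out.append(x)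
--             last = x
--     return out
-- ===== Notes on version B (the rewrite author's own statement) =====
-- stated objective: faster
-- what changed: replaced A's repeated quadratic deletion passes (n outer rounds, each scanning and deleting in place) by a single left-to-right pass that keeps an element iff it is <= the last kept element
import Mathlib
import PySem

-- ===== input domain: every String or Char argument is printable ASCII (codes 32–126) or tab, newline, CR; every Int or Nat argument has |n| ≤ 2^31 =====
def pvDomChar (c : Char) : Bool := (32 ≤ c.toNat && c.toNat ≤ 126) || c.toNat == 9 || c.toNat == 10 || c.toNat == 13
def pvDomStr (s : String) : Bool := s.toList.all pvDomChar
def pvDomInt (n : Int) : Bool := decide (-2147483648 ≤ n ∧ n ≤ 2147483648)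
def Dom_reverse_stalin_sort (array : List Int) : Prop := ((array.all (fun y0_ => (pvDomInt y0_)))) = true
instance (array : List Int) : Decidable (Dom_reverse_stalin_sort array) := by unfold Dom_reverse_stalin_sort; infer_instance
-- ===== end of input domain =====

-- B replaces A's repeated in-place deletion passes by one linear pass keeping x iff x ≤ the last kept element.

-- ===== PORT A =====
-- inner 'while i < array_size - 1' loop of A, carrying (array, array_size, i);
-- 'del array[i+1]' is PySem.List.pop? (the index is always in range while size = len array,
-- so the 'none' IndexError branches are unreachable).
def rssInner (arr : List Int) (size i : Int) : List Int × Int :=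
  if i < size - 1 then
    match PySem.List.pyGet? arr i, PySem.List.pyGet? arr (i + 1) with
    | some a, some b =>
      if a < b then
        match PySem.List.pop? arr (i + 1) with
        | some r => rssInner r.2 (size - 1) (i + 1)
        | none => (arr, size)
      else rssInner arr size (i + 1)
    | _, _ => (arr, size)
  else (arr, size)
termination_by (size - i).toNat
decreasing_by all_goals omega

def reverse_stalin_sort (array : List Int) : List Int :=
  ((PySem.List.pyRange 0 (array.length : Int) 1).foldl
    (fun st _ => rssInner st.1 st.2 0) (array, (array.length : Int))).1

-- ===== PORT B =====
-- state = (out, last); last = None is Option Int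
def reverse_stalin_sort_alt (array : List Int) : List Int :=
  (array.foldl
    (fun (st : List Int × Option Int) x =>
      match st.2 with
      | none => (st.1 ++ [x], some x)
      | some last => if x ≤ last then (st.1 ++ [x], some x) else st)
    ([], none)).1

-- ===== PRECONDITION & SPEC =====
def Spec_reverse_stalin_sort (array : List Int) (out : List Int) : Prop := out = reverse_stalin_sort_alt array
instance (array : List Int) (out : List Int) : Decidable (Spec_reverse_stalin_sort array out) := by unfold Spec_reverse_stalin_sort; infer_instance

-- ===== CLAIM (what is proved, stated in full; the proofs are below) =====
def Claim_equal_reverse_stalin_sort : Prop := ∀ (array : List Int), Dom_reverse_stalin_sort array → Spec_reverse_stalin_sort array (reverse_stalin_sort array)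

-- ===== LEMMAS AND PROOFS =====

-- one sweep of A's inner while loop, expressed structurally
def pass1 : List Int → List Int
  | a :: b :: rest => if a < b then a :: pass1 rest else a :: pass1 (b :: rest)
  | l => l

-- B's filter, with m = last kept element
def keep (m : Int) : List Int → List Int
  | [] => []
  | x :: xs => if x ≤ m then x :: keep x xs else keep m xs

def bfun : List Int → List Int
  | [] => []
  | x :: xs => x :: keep x xs

lemma pass1_short (l : List Int) (h : ∀ a b rest, l = a :: b :: rest → False) :
    pass1 l = l := by
  cases l with
  | nil => rfl
  | cons x t =>
    cases t with
    | nil => rfl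
    | cons y u => exact (h x y u rfl).elim

lemma bfun_short (l : List Int) (h : ∀ a b rest, l = a :: b :: rest → False) :
    bfun l = l := by
  cases l with
  | nil => rfl
  | cons x t =>
    cases t with
    | nil => rfl
    | cons y u => exact (h x y u rfl).elim

lemma alt_foldl (l : List Int) : ∀ (out : List Int) (m : Int),
    (l.foldl (fun (st : List Int × Option Int) x =>
      match st.2 with
      | none => (st.1 ++ [x], some x)
      | some last => if x ≤ last then (st.1 ++ [x], some x) else st) (out, some m)).1
    = out ++ keep m l := by
  induction l with
  | nil => intro out m; simp [keep]
  | cons x xs ih =>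
    intro out m
    simp only [List.foldl_cons, keep]
    by_cases h : x ≤ m
    · simp [h, ih]
    · simp [h, ih]

lemma alt_eq_bfun (l : List Int) : reverse_stalin_sort_alt l = bfun l := by
  cases l with
  | nil => rfl
  | cons x xs =>
    simp only [reverse_stalin_sort_alt, List.foldl_cons, bfun]
    simpa using alt_foldl xs [x] x

lemma keep_pass1 (l : List Int) : ∀ m, keep m (pass1 l) = keep m l := by
  induction l using pass1.induct with
  | case1 a b rest hab ih =>
    intro m
    have hba : ¬ b ≤ a := not_le.mpr hab
    by_cases ham : a ≤ m
    · simp only [pass1, if_pos hab, keep, if_pos ham, ih, if_neg hba]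
    · have hbm : ¬ b ≤ m := by omega
      simp only [pass1, if_pos hab, keep, if_neg ham, ih, if_neg hbm]
  | case2 a b rest hab ih =>
    intro m
    simp only [pass1, if_neg hab, keep, ih]
  | case3 l h =>
    intro m
    rw [pass1_short l h]

lemma pass1_length_le (l : List Int) : (pass1 l).length ≤ l.length := by
  induction l using pass1.induct with
  | case1 a b rest h ih => simp [pass1, if_pos h]; omega
  | case2 a b rest h ih => simp [pass1, if_neg h] at ih ⊢; omega
  | case3 l h => rw [pass1_short l h]

lemma pass1_ne_length (l : List Int) (h : pass1 l ≠ l) : (pass1 l).length < l.length := by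
  induction l using pass1.induct with
  | case1 a b rest hab ih =>
    have := pass1_length_le rest
    simp [pass1, if_pos hab]; omega
  | case2 a b rest hab ih =>
    simp only [pass1, if_neg hab] at h ⊢
    have h2 : pass1 (b :: rest) ≠ b :: rest := by
      intro he; exact h (by rw [he])
    have := ih h2
    simpa using Nat.succ_lt_succ this
  | case3 l hl => exact absurd (pass1_short l hl) h

lemma pass1_fix_bfun (l : List Int) (h : pass1 l = l) : bfun l = l := by
  induction l using pass1.induct with
  | case1 a b rest hab ih =>
    exfalso
    rw [pass1, if_pos hab] at h
    have h1 := pass1_length_le rest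
    have h2 : (a :: pass1 rest).length = (a :: b :: rest).length := by rw [h]
    simp at h2; omega
  | case2 a b rest hab ih =>
    rw [pass1, if_neg hab] at h
    have h2 : pass1 (b :: rest) = b :: rest := by injection h
    have h3 := ih h2
    simp only [bfun] at h3 ⊢
    have hkb : keep b rest = rest := by injection h3
    simp [keep, not_lt.mp hab, hkb]
  | case3 l hl => exact bfun_short l hl

lemma pass1_fix_iter (l : List Int) (h : pass1 l = l) : ∀ k, pass1^[k] l = l := by
  intro k
  induction k with
  | zero => rfl
  | succ k ih => rw [Function.iterate_succ_apply, h, ih]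

lemma bfun_pass1 (l : List Int) : bfun (pass1 l) = bfun l := by
  cases l with
  | nil => rfl
  | cons a t =>
    cases t with
    | nil => rfl
    | cons b rest =>
      by_cases hab : a < b
      · rw [pass1, if_pos hab]
        simp only [bfun, keep_pass1]
        have : keep a (b :: rest) = keep a rest := by
          simp [keep, not_le.mpr hab]
        rw [this]
      · rw [pass1, if_neg hab]
        simp only [bfun, keep_pass1]

lemma bfun_iter (l : List Int) (k : Nat) : bfun (pass1^[k] l) = bfun l := by
  induction k with
  | zero => rfl
  | succ k ih => rw [Function.iterate_succ_apply', bfun_pass1, ih]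

lemma iter_fix (k : Nat) : ∀ l : List Int, l.length ≤ k + 1 → pass1 (pass1^[k] l) = pass1^[k] l := by
  induction k with
  | zero =>
    intro l hl
    have : ∀ a b rest, l = a :: b :: rest → False := by
      intro a b rest he; subst he; simp at hl
    simpa [Function.iterate_zero] using pass1_short l this
  | succ k ih =>
    intro l hl
    by_cases h : pass1 l = l
    · rw [pass1_fix_iter l h, h]
    · have := pass1_ne_length l h
      rw [Function.iterate_succ_apply]
      exact ih (pass1 l) (by omega)

lemma iterate_bfun (l : List Int) : pass1^[l.length] l = bfun l := by
  cases hn : l.length with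
  | zero =>
    have : l = [] := List.length_eq_zero_iff.mp hn
    subst this; rfl
  | succ k =>
    have hfix : pass1 (pass1^[k] l) = pass1^[k] l := iter_fix k l (by omega)
    have hstep : pass1^[k+1] l = pass1^[k] l := by
      rw [Function.iterate_succ_apply', hfix]
    rw [hstep, ← bfun_iter l k, pass1_fix_bfun _ hfix]


lemma eraseIdx_append_add {α : Type} (pre : List α) : ∀ (l : List α) (k : Nat),
    (pre ++ l).eraseIdx (pre.length + k) = pre ++ l.eraseIdx k := by
  induction pre with
  | nil => intro l k; simp
  | cons x p ih =>
    intro l k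
    show (x :: (p ++ l)).eraseIdx (p.length + 1 + k) = x :: (p ++ l.eraseIdx k)
    rw [show p.length + 1 + k = (p.length + k) + 1 by omega]
    simp [List.eraseIdx_cons_succ, ih]

-- bridge: the ported inner loop computes pass1
lemma rssInner_eq (suf : List Int) : ∀ pre : List Int,
    rssInner (pre ++ suf) ((pre.length : Int) + suf.length) (pre.length : Int)
      = (pre ++ pass1 suf, (pre.length : Int) + (pass1 suf).length) := by
  induction suf using pass1.induct with
  | case1 a b rest hab ih =>
    intro pre
    rw [rssInner, if_pos (by simp; omega)]
    rw [PySem.List.pyGet?_append_length]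
    have hb : PySem.List.pyGet? (pre ++ a :: b :: rest) ((pre.length : Int) + 1) = some b := by
      rw [show pre ++ a :: b :: rest = (pre ++ [a]) ++ b :: rest by simp,
          show ((pre.length : Int) + 1) = (((pre ++ [a]).length : Int)) by simp]
      exact PySem.List.pyGet?_append_length _ _ _
    rw [hb]
    simp only [if_pos hab]
    have hpop : PySem.List.pop? (pre ++ a :: b :: rest) ((pre.length : Int) + 1)
        = some (b, pre ++ a :: rest) := by
      rw [show ((pre.length:Int)+1) = ((pre.length+1 : Nat) : Int) by push_cast; ring]
      rw [PySem.List.pop?_natCast _ (pre.length+1) (by simp)]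
      congr 1
      refine Prod.ext ?_ ?_
      · show (pre ++ a :: b :: rest)[pre.length + 1]'(by simp) = b
        rw [List.getElem_append_right (by omega)]
        simp
      · show (pre ++ a :: b :: rest).eraseIdx (pre.length + 1) = pre ++ a :: rest
        rw [eraseIdx_append_add]
        simp
    rw [hpop]
    rw [show pre ++ a :: rest = (pre ++ [a]) ++ rest by simp,
        show ((pre.length:Int) + ((a :: b :: rest).length:Int) - 1)
          = (((pre ++ [a]).length : Int) + (rest.length : Int)) by simp; ring,
        show ((pre.length : Int) + 1) = (((pre ++ [a]).length : Int)) by simp]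
    show rssInner ((pre ++ [a]) ++ rest) (((pre ++ [a]).length : Int) + (rest.length : Int))
        (((pre ++ [a]).length : Int)) = _
    rw [ih (pre ++ [a]), pass1, if_pos hab]
    refine Prod.ext (by simp) ?_
    simp; ring
  | case2 a b rest hab ih =>
    intro pre
    rw [rssInner, if_pos (by simp; omega)]
    rw [PySem.List.pyGet?_append_length]
    have hb : PySem.List.pyGet? (pre ++ a :: b :: rest) ((pre.length : Int) + 1) = some b := by
      rw [show pre ++ a :: b :: rest = (pre ++ [a]) ++ b :: rest by simp,
          show ((pre.length : Int) + 1) = (((pre ++ [a]).length : Int)) by simp]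
      exact PySem.List.pyGet?_append_length _ _ _
    rw [hb]
    simp only [if_neg hab]
    rw [show pre ++ a :: b :: rest = (pre ++ [a]) ++ b :: rest by simp,
        show ((pre.length:Int) + ((a :: b :: rest).length:Int))
          = (((pre ++ [a]).length : Int) + ((b :: rest).length : Int)) by simp; ring,
        show ((pre.length : Int) + 1) = (((pre ++ [a]).length : Int)) by simp,
        ih (pre ++ [a]), pass1, if_neg hab]
    refine Prod.ext (by simp) ?_
    simp; ring
  | case3 l hl =>
    intro pre
    have hlen : l.length ≤ 1 := by
      cases l with
      | nil => simp
      | cons x t =>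
        cases t with
        | nil => simp
        | cons y u => exact (hl x y u rfl).elim
    rw [rssInner, if_neg (by omega), pass1_short l hl]

lemma rssInner_pass1 (l : List Int) :
    rssInner l (l.length : Int) 0 = (pass1 l, ((pass1 l).length : Int)) := by
  simpa using rssInner_eq l []

lemma foldl_const_iterate {α β : Type} (f : α → α) (l : List β) :
    ∀ init : α, l.foldl (fun st _ => f st) init = f^[l.length] init := by
  induction l with
  | nil => intro init; rfl
  | cons x xs ih =>
    intro init
    simp [List.foldl_cons, ih, Function.iterate_succ_apply]

lemma iter_state (l : List Int) (k : Nat) :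
    (fun st : List Int × Int => rssInner st.1 st.2 0)^[k] (l, (l.length : Int))
      = (pass1^[k] l, ((pass1^[k] l).length : Int)) := by
  induction k generalizing l with
  | zero => rfl
  | succ k ih =>
    rw [Function.iterate_succ_apply, Function.iterate_succ_apply]
    simp only [rssInner_pass1]
    exact ih (pass1 l)

-- ===== VERDICT (by name: the statement is the Claim_ definition above) =====
theorem reverse_stalin_sort_spec : Claim_equal_reverse_stalin_sort := by
  intro array _
  unfold Spec_reverse_stalin_sort reverse_stalin_sort
  rw [alt_eq_bfun]
  have hlen : (PySem.List.pyRange 0 (array.length : Int) 1).length = array.length := by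
    rw [PySem.List.length_pyRange_one]; omega
  rw [foldl_const_iterate (fun st : List Int × Int => rssInner st.1 st.2 0), hlen,
    iter_state, iterate_bfun]
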